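-- pv_equiv track=rewrite | github.com/Zaidi-Alisha/AI-Lab | Final exam preparation/CSP.py | backtrack
-- ===== SOURCE A (Python) =====
-- conflicts = {
--     'C1': ['C2', 'C3'],
--     'C2': ['C1', 'C4'],
--     'C3': ['C1'],
--     'C4': ['C2']
-- }
--
-- timeslots = ['T1', 'T2', 'T3']
--
-- def is_valid(course, timeslot, schedule):
--     for conflict_course in conflicts.get(course, []):
--         if schedule.get(conflict_course) == timeslot:
--             return False
--     return True
--
-- def backtrack(schedule):
--     # All courses scheduled
--     if len(schedule) == len(conflicts):
--         return schedule
--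
--     # Pick an unscheduled course
--     unassigned = [c for c in conflicts if c not in schedule][0]
--
--     for timeslot in timeslots:
--         if is_valid(unassigned, timeslot, schedule):
--             schedule[unassigned] = timeslot
--             result = backtrack(schedule)
--             if result:
--                 return result
--             del schedule[unassigned]
--
--     return None
-- ===== SOURCE B (Python) =====
-- conflicts = {
--     'C1': ['C2', 'C3'],
--     'C2': ['C1', 'C4'],
--     'C3': ['C1'],
--     'C4': ['C2']
-- }
--
-- timeslots = ['T1', 'T2', 'T3']
--
-- def backtrack(schedule):
--     # Greedy single pass: repeatedly assign the first unscheduled course the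
--     # first timeslot not used by any of its conflicts (mutates schedule in place).
--     while len(schedule) != len(conflicts):
--         unassigned = [c for c in conflicts if c not in schedule]
--         if not unassigned:
--             return None
--         course = unassigned[0]
--         taken = {schedule.get(c) for c in conflicts[course]}
--         schedule[course] = next(t for t in timeslots if t not in taken)
--     return schedule
-- ===== Notes on version B (the rewrite author's own statement) =====
-- stated objective: simpler
-- what changed: Replaces the recursive backtracking search (try each timeslot, recurse, undo with del on failure) by a single iterative greedy pass that gives each unscheduled course the first timeslot not taken by its conflicts; with 3 timeslots and at most 2 conflicts per course a free slot always exists, so no backtracking is ever needed.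
-- outside the precondition, e.g. on backtrack({'a': 'x', 'b': 'x', 'c': 'x', 'd': 'x', 'e': 'x'}): A raises IndexError, B returns None
import Mathlib
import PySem

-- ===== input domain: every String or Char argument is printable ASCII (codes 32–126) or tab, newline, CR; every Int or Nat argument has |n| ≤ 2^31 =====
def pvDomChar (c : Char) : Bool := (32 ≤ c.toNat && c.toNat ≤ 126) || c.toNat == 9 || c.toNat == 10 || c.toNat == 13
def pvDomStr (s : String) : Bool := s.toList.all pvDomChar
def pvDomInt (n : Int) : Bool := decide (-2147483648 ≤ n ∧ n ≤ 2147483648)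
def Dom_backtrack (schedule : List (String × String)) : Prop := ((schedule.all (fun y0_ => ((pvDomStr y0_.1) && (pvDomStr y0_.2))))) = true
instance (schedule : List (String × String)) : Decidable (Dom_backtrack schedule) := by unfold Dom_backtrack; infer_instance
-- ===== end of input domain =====

-- B replaces A's recursive backtracking search by a single greedy pass (first free
-- timeslot per course, no trial/undo); equality is about the RETURN value — both
-- Pythons also mutate the passed dict identically on the admitted inputs.

-- ===== PORT A =====
def pyConflicts : PySem.Dict String (List String) :=
  PySem.Dict.ofList [("C1", ["C2", "C3"]), ("C2", ["C1", "C4"]), ("C3", ["C1"]), ("C4", ["C2"])]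

def pyTimeslots : List String := ["T1", "T2", "T3"]

def is_valid (course : String) (timeslot : String) (schedule : PySem.Dict String String) : Bool :=
  (pyConflicts.getD course []).all (fun cc => !(schedule.get? cc == some timeslot))

mutual
-- fuel is a totality guard only: each nesting level schedules one of the 4 courses,
-- so from `backtrack`'s fuel 5 the 0 branch is never reached.
def goA (fuel : Nat) (schedule : PySem.Dict String String) : Option (PySem.Dict String String) :=
  match fuel with
  | 0 => none
  | f + 1 =>
    if schedule.size == pyConflicts.size then some schedule
    else
      match pyConflicts.keys.filter (fun c => !(schedule.contains c)) with
      | [] => none          -- Python raises IndexError on [...][0]; excluded by Pre_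
      | c :: _ => trySlotsA f c schedule pyTimeslots
  termination_by (fuel, 0)

def trySlotsA (f : Nat) (c : String) (schedule : PySem.Dict String String)
    (slots : List String) : Option (PySem.Dict String String) :=
  match slots with
  | [] => none
  | t :: rest =>
    if is_valid c t schedule then
      match goA f (schedule.insert c t) with
      | some r => if r.size == 0 then trySlotsA f c schedule rest else some r  -- `if result:` truthiness
      | none => trySlotsA f c schedule rest   -- `del schedule[c]`: continue with the original dict
    else trySlotsA f c schedule rest
  termination_by (f, slots.length + 1)
end

def backtrack (schedule : List (String × String)) : Option (List (String × String)) :=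
  (goA 5 (PySem.Dict.ofList schedule)).map (fun r => r.items)

-- ===== PORT B =====
def freeSlot (course : String) (schedule : PySem.Dict String String) : Option String :=
  let taken : PySem.Set (Option String) :=
    PySem.Set.ofList ((pyConflicts.getD course []).map (fun cc => schedule.get? cc))
  pyTimeslots.find? (fun t => !(PySem.Set.contains taken (some t)))

-- fuel is a totality guard only: the while loop runs at most 5 times (one missing
-- course scheduled per iteration), so from fuel 5 the 0 branch is never reached.
def goB (fuel : Nat) (schedule : PySem.Dict String String) : Option (PySem.Dict String String) :=
  match fuel with
  | 0 => none
  | f + 1 =>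
    if schedule.size == pyConflicts.size then some schedule
    else
      match pyConflicts.keys.filter (fun c => !(schedule.contains c)) with
      | [] => none
      | c :: _ =>
        match freeSlot c schedule with
        | some t => goB f (schedule.insert c t)
        | none => none   -- `next` exhausted; unreachable (≤ 2 conflicts, 3 slots)

def backtrack_alt (schedule : List (String × String)) : Option (List (String × String)) :=
  (goB 5 (PySem.Dict.ofList schedule)).map (fun r => r.items)

-- ===== PRECONDITION & SPEC =====
-- Pre_ excludes exactly the dicts with more than 4 distinct keys, on which A raises
-- IndexError (the unassigned-course comprehension comes back empty while len ≠ 4).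
def Pre_backtrack (schedule : List (String × String)) : Prop :=
  (PySem.Dict.ofList schedule : PySem.Dict String String).size ≤ 4
instance (schedule : List (String × String)) : Decidable (Pre_backtrack schedule) := by
  unfold Pre_backtrack; infer_instance

def pvWitness_backtrack : (List (String × String)) := [("C1", "T1")]

def Spec_backtrack (schedule : List (String × String)) (out : Option (List (String × String))) : Prop := out = backtrack_alt schedule
instance (schedule : List (String × String)) (out : Option (List (String × String))) : Decidable (Spec_backtrack schedule out) := by unfold Spec_backtrack; infer_instance

-- ===== CLAIM (what is proved, stated in full; the proofs are below) =====
def Claim_equal_backtrack : Prop := ∀ (schedule : List (String × String)), Dom_backtrack schedule → Pre_backtrack schedule → Spec_backtrack schedule (backtrack schedule)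

-- ===== LEMMAS AND PROOFS =====


def missD (d : PySem.Dict String String) : Nat :=
  (pyConflicts.keys.filter (fun c => !(d.contains c))).length

lemma pyKeys : pyConflicts.keys = ["C1", "C2", "C3", "C4"] := rfl
lemma pySize : pyConflicts.size = 4 := rfl
lemma conf1 : pyConflicts.getD "C1" [] = ["C2", "C3"] := rfl
lemma conf2 : pyConflicts.getD "C2" [] = ["C1", "C4"] := rfl
lemma conf3 : pyConflicts.getD "C3" [] = ["C1"] := rfl
lemma conf4 : pyConflicts.getD "C4" [] = ["C2"] := rfl

lemma freeSlot_eq (c : String) (d : PySem.Dict String String) :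
    freeSlot c d = pyTimeslots.find? (fun t => is_valid c t d) := by
  show (List.find? (fun t => !(PySem.Set.ofList ((pyConflicts.getD c []).map (fun cc => d.get? cc))).contains (some t)) pyTimeslots) = _
  congr 1
  funext t
  rw [Bool.eq_iff_iff]
  simp [is_valid, PySem.Set.mem_ofList]

lemma pigeon (o1 o2 : Option String) :
    (!(o1 == some "T1") && !(o2 == some "T1")) = true ∨
    (!(o1 == some "T2") && !(o2 == some "T2")) = true ∨
    (!(o1 == some "T3") && !(o2 == some "T3")) = true := by
  by_cases h1 : o1 = some "T1" <;> by_cases h2 : o2 = some "T1" <;>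
    by_cases h3 : o1 = some "T2" <;> by_cases h4 : o2 = some "T2" <;> simp_all

lemma exists_valid (c : String) (hc : c ∈ pyConflicts.keys) (d : PySem.Dict String String) :
    ∃ t ∈ pyTimeslots, is_valid c t d = true := by
  rw [pyKeys] at hc
  simp only [List.mem_cons, List.not_mem_nil, or_false] at hc
  rcases hc with rfl | rfl | rfl | rfl
  · rcases pigeon (d.get? "C2") (d.get? "C3") with h | h | h
    exacts [⟨"T1", by simp [pyTimeslots], by simp [is_valid, conf1]; simpa using h⟩,
            ⟨"T2", by simp [pyTimeslots], by simp [is_valid, conf1]; simpa using h⟩,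
            ⟨"T3", by simp [pyTimeslots], by simp [is_valid, conf1]; simpa using h⟩]
  · rcases pigeon (d.get? "C1") (d.get? "C4") with h | h | h
    exacts [⟨"T1", by simp [pyTimeslots], by simp [is_valid, conf2]; simpa using h⟩,
            ⟨"T2", by simp [pyTimeslots], by simp [is_valid, conf2]; simpa using h⟩,
            ⟨"T3", by simp [pyTimeslots], by simp [is_valid, conf2]; simpa using h⟩]
  · rcases pigeon (d.get? "C1") (d.get? "C1") with h | h | h
    exacts [⟨"T1", by simp [pyTimeslots], by simp [is_valid, conf3]; simpa using h⟩,
            ⟨"T2", by simp [pyTimeslots], by simp [is_valid, conf3]; simpa using h⟩,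
            ⟨"T3", by simp [pyTimeslots], by simp [is_valid, conf3]; simpa using h⟩]
  · rcases pigeon (d.get? "C2") (d.get? "C2") with h | h | h
    exacts [⟨"T1", by simp [pyTimeslots], by simp [is_valid, conf4]; simpa using h⟩,
            ⟨"T2", by simp [pyTimeslots], by simp [is_valid, conf4]; simpa using h⟩,
            ⟨"T3", by simp [pyTimeslots], by simp [is_valid, conf4]; simpa using h⟩]

lemma trySlots_eq (f : Nat) (c : String) (d : PySem.Dict String String)
    (H : ∀ t, is_valid c t d = true → ∃ r, goA f (d.insert c t) = some r ∧ r.size = 4)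
    (slots : List String) :
    trySlotsA f c d slots =
      match slots.find? (fun t => is_valid c t d) with
      | some t => goA f (d.insert c t)
      | none => none := by
  induction slots with
  | nil => simp [trySlotsA]
  | cons t rest ih =>
    by_cases hv : is_valid c t d = true
    · obtain ⟨r, hr, h4⟩ := H t hv
      simp [trySlotsA, hv, List.find?_cons_of_pos, hr, h4]
    · simp only [Bool.not_eq_true] at hv
      simp [trySlotsA, hv, List.find?_cons_of_neg, ih]

lemma miss_insert (d : PySem.Dict String String) (c t : String)
    (hc : c ∈ pyConflicts.keys) (hnc : d.contains c = false) :
    missD (d.insert c t) < missD d := by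
  unfold missD
  have hpt : ∀ x ∈ pyConflicts.keys,
      (!((d.insert c t).contains x)) = ((fun x => !(x == c)) x && (fun x => !(d.contains x)) x) := by
    intro x _
    rw [PySem.Dict.contains_insert]
    cases hxc : x == c <;> simp [hxc]
  rw [List.filter_congr hpt, ← List.filter_filter]
  apply List.length_filter_lt_length_iff_exists.mpr
  refine ⟨c, List.mem_filter.mpr ⟨hc, by simp [hnc]⟩, by simp⟩

lemma miss_pos (d : PySem.Dict String String) (hlt : d.size < 4) :
    0 < missD d := by
  have hsub : (pyConflicts.keys.filter (fun c => d.contains c)) ⊆ d.keys := by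
    intro x hx
    exact (PySem.Dict.contains_iff_mem_keys _ _).mp (List.mem_filter.mp hx).2
  have hnd4 : (pyConflicts.keys.filter (fun c => d.contains c)).Nodup :=
    (by decide : pyConflicts.keys.Nodup).filter _
  have h1 : (pyConflicts.keys.filter (fun c => d.contains c)).length ≤ d.keys.length :=
    (List.subperm_of_subset hnd4 hsub).length_le
  have hkl : d.keys.length = d.size := by simp [PySem.Dict.keys, PySem.Dict.size]
  have hsum : pyConflicts.keys.length =
      (List.filter (fun c => d.contains c) pyConflicts.keys).length + missD d := by
    simpa [missD] using List.length_eq_length_filter_add (l := pyConflicts.keys) (fun c => d.contains c)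
  have hk4 : pyConflicts.keys.length = 4 := rfl
  omega

lemma goAB : ∀ (fuel : Nat) (d : PySem.Dict String String), d.keys.Nodup → d.size ≤ 4 →
    missD d < fuel → ∃ r, goA fuel d = some r ∧ goB fuel d = some r ∧ r.size = 4 := by
  intro fuel
  induction fuel with
  | zero => intro d _ _ h; omega
  | succ f ih =>
    intro d hnd hsz hm
    by_cases h4 : d.size = 4
    · exact ⟨d, by simp [goA, pySize, h4], by simp [goB, pySize, h4], h4⟩
    · have hlt : d.size < 4 := by omega
      have hpos : 0 < missD d := miss_pos d hlt
      cases hms : pyConflicts.keys.filter (fun c => !(d.contains c)) with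
      | nil => unfold missD at hpos; rw [hms] at hpos; simp at hpos
      | cons c rest =>
        have hcmem : c ∈ pyConflicts.keys.filter (fun c => !(d.contains c)) := by
          rw [hms]; exact List.mem_cons_self
        have hck : c ∈ pyConflicts.keys := (List.mem_filter.mp hcmem).1
        have hnc : d.contains c = false := by
          have := (List.mem_filter.mp hcmem).2; simpa using this
        have H : ∀ t, is_valid c t d = true →
            ∃ r, goA f (d.insert c t) = some r ∧ goB f (d.insert c t) = some r ∧ r.size = 4 := by
          intro t _
          apply ih
          · exact PySem.Dict.nodup_keys_insert _ _ _ hnd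
          · simp [PySem.Dict.size_insert, hnc]; omega
          · have := miss_insert d c t hck hnc
            have hmiss : missD (d.insert c t) < missD d := this
            omega
        obtain ⟨t1, ht1, hvt1⟩ := exists_valid c hck d
        have hs : (pyTimeslots.find? (fun t => is_valid c t d)).isSome :=
          List.find?_isSome.mpr ⟨t1, ht1, hvt1⟩
        obtain ⟨t0, hf⟩ := Option.isSome_iff_exists.mp hs
        have hv0 : is_valid c t0 d = true := by simpa using List.find?_some hf
        obtain ⟨r, hA, hB, h4r⟩ := H t0 hv0
        refine ⟨r, ?_, ?_, h4r⟩
        · have hAe : goA (f + 1) d = trySlotsA f c d pyTimeslots := by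
            simp [goA, pySize, h4, hms]
          have hT := trySlots_eq f c d (fun t hvv => ((H t hvv).imp fun r hr => ⟨hr.1, hr.2.2⟩)) pyTimeslots
          rw [hAe, hT, hf]
          exact hA
        · have hBe : goB (f + 1) d =
              (match freeSlot c d with
               | some t => goB f (d.insert c t)
               | none => none) := by
            simp [goB, pySize, h4, hms]
          rw [hBe, freeSlot_eq, hf]
          exact hB

theorem backtrack_spec : Claim_equal_backtrack := by
  intro schedule _ hpre
  unfold Spec_backtrack backtrack backtrack_alt
  have hnd : (PySem.Dict.ofList schedule : PySem.Dict String String).keys.Nodup :=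
    PySem.Dict.nodup_keys_ofList schedule
  have hb : missD (PySem.Dict.ofList schedule) < 5 := by
    have h := List.length_filter_le (fun c => !((PySem.Dict.ofList schedule : PySem.Dict String String).contains c)) pyConflicts.keys
    rw [pyKeys] at h
    unfold missD
    rw [pyKeys]
    simp only [List.length_cons, List.length_nil] at h ⊢
    omega
  obtain ⟨r, hA, hB, _⟩ := goAB 5 _ hnd hpre hb
  rw [hA, hB]
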